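-- pv_equiv track=rewrite | github.com/newrlan/finite_structures | src/rubik/words.py | _combination_of_splits
-- ===== SOURCE A (Python) =====
-- from itertools import combinations, combinations_with_replacement, product
-- from math import comb, factorial
--
-- def _combination_of_splits(n: int, k: int) -> int:
--     cum = 0
--     for arr in combinations_with_replacement([i for i in range(k)], n-k):
--         loc_cum = factorial(n)
--         for i in range(k):
--             ki = 1 + len([x for x in arr if x == i])
--             loc_cum //= factorial(ki)
--         cum += loc_cum
--     return cum
-- ===== SOURCE B (Python) =====
-- from math import comb
--
-- def _combination_of_splits(n: int, k: int) -> int: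
--     # surjection count by inclusion-exclusion instead of enumerating all
--     # multisets of split points
--     return sum((-1) ** j * comb(k, j) * (k - j) ** n for j in range(k + 1))
-- ===== Notes on version B (the rewrite author's own statement) =====
-- stated objective: faster
-- what changed: Replaces the enumeration of all C(n-1,n-k) multisets of split points (summing a multinomial for each) by the closed-form inclusion-exclusion surjection count sum((-1)^j*C(k,j)*(k-j)^n for j in range(k+1)).
import Mathlib
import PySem

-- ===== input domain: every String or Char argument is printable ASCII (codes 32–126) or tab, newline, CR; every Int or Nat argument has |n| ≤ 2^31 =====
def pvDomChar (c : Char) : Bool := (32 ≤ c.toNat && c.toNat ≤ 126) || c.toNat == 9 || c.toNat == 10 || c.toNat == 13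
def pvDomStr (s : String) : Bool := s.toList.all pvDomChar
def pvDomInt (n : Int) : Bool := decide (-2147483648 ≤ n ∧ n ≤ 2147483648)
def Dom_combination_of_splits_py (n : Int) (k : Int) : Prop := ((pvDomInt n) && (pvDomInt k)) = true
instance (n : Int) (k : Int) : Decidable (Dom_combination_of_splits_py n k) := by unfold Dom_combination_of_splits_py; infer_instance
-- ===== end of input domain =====

-- B replaces the exponential enumeration of multisets of split points by the O(k)
-- inclusion-exclusion surjection-count formula; equal on all inputs where A returns.

-- ===== PORT A =====
-- math.factorial, ported as CPython's divide-and-conquer product of [1, m]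
-- (proved equal to Nat.factorial in pyFactI_eq below); Python raises ValueError
-- on a negative argument (those calls are excluded by Pre_)
def pvProdRange (a b : Nat) : Nat :=
  -- product of the integers in [a, b)
  if b ≤ a + 1 then (if b ≤ a then 1 else a)
  else
    pvProdRange a ((a + b) / 2) * pvProdRange ((a + b) / 2) b
  termination_by b - a
  decreasing_by all_goals omega

def pyFactI (m : Int) : Int := (pvProdRange 1 (m.toNat + 1) : Int)

-- itertools.combinations_with_replacement(pool, r), in Python's lexicographic order
def pvCwr : List Int → Nat → List (List Int)
  | _, 0 => [[]]
  | [], _ + 1 => []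
  | x :: xs, r + 1 => (pvCwr (x :: xs) r).map (fun a => x :: a) ++ pvCwr xs (r + 1)
  termination_by pool r => (r, pool.length)

def combination_of_splits_py (n : Int) (k : Int) : Int :=
  -- combinations_with_replacement raises ValueError for negative r = n-k (excluded by Pre_)
  if n - k < 0 then 0
  else
    -- factorial(n) is loop-invariant: the same value Python recomputes each iteration,
    -- computed once here
    let nf := pyFactI n
    (pvCwr (PySem.List.pyRange 0 k 1) (n - k).toNat).foldl
      (fun cum arr =>
        cum +
          (PySem.List.pyRange 0 k 1).foldl
            (fun loc i =>
              PySem.Int.floordiv loc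
                (pyFactI (1 + ((arr.filter (fun x => x == i)).length : Int))))
            nf)
      0

-- ===== PORT B =====
-- sum((-1)**j * comb(k, j) * (k - j)**n for j in range(k + 1)); within Pre_ the loop body
-- only runs with 0 ≤ j ≤ k ≤ n, so the .toNat coercions are exact
def combination_of_splits_py_alt (n : Int) (k : Int) : Int :=
  (PySem.List.pyRange 0 (k + 1) 1).foldl
    (fun acc j => acc + (-1) ^ j.toNat * (Nat.choose k.toNat j.toNat : Int) * (k - j) ^ n.toNat)
    0

-- ===== PRECONDITION & SPEC =====
-- Pre_ excludes exactly the inputs where A raises ValueError: n < k (negative r for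
-- combinations_with_replacement) and n = k < 0 (factorial of a negative number).
def Pre_combination_of_splits_py (n : Int) (k : Int) : Prop := k ≤ n ∧ (0 ≤ n ∨ k < n)
instance (n : Int) (k : Int) : Decidable (Pre_combination_of_splits_py n k) := by
  unfold Pre_combination_of_splits_py; infer_instance

def pvWitness_combination_of_splits_py : Int × Int := (4, 2)

def Spec_combination_of_splits_py (n : Int) (k : Int) (out : Int) : Prop := out = combination_of_splits_py_alt n k
instance (n : Int) (k : Int) (out : Int) : Decidable (Spec_combination_of_splits_py n k out) := by unfold Spec_combination_of_splits_py; infer_instance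

-- ===== CLAIM (what is proved, stated in full; the proofs are below) =====
def Claim_equal_combination_of_splits_py : Prop := ∀ (n : Int) (k : Int), Dom_combination_of_splits_py n k → Pre_combination_of_splits_py n k → Spec_combination_of_splits_py n k (combination_of_splits_py n k)

-- ===== LEMMAS AND PROOFS =====

-- every element of a combination comes from the pool
theorem pvCwr_mem_subset : ∀ (pool : List Int) (r : Nat) (arr : List Int),
    arr ∈ pvCwr pool r → ∀ x ∈ arr, x ∈ pool := by
  intro pool r
  induction pool, r using pvCwr.induct with
  | case1 pool => intro arr h; simp [pvCwr] at h; simp [h]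
  | case2 r => intro arr h; simp [pvCwr] at h
  | case3 x xs r ih1 ih2 =>
    intro arr h
    simp only [pvCwr, List.mem_append, List.mem_map] at h
    rcases h with ⟨a, ha, rfl⟩ | h
    · intro y hy
      rcases List.mem_cons.mp hy with rfl | hy
      · simp
      · exact ih1 a ha y hy
    · intro y hy
      exact List.mem_cons_of_mem _ (ih2 arr h y hy)

-- every combination has length r
theorem pvCwr_mem_length : ∀ (pool : List Int) (r : Nat) (arr : List Int),
    arr ∈ pvCwr pool r → arr.length = r := by
  intro pool r
  induction pool, r using pvCwr.induct with
  | case1 pool => intro arr h; simp [pvCwr] at h; simp [h]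
  | case2 r => intro arr h; simp [pvCwr] at h
  | case3 x xs r ih1 ih2 =>
    intro arr h
    simp only [pvCwr, List.mem_append, List.mem_map] at h
    rcases h with ⟨a, ha, rfl⟩ | h
    · simpa using ih1 a ha
    · exact ih2 arr h

-- summing any function over pvCwr (x :: xs) r, grouped by the multiplicity of x
theorem sum_pvCwr_cons (x : Int) (xs : List Int) (r : Nat) (f : List Int → ℚ) :
    ((pvCwr (x :: xs) r).map f).sum =
      ∑ m ∈ Finset.range (r + 1),
        ((pvCwr xs (r - m)).map (fun a => f (List.replicate m x ++ a))).sum := by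
  induction r generalizing f with
  | zero => simp [pvCwr]
  | succ r ih =>
    rw [Finset.sum_range_succ']
    simp only [Nat.succ_sub_succ, Nat.sub_zero, List.replicate_zero, List.nil_append]
    simp only [pvCwr, List.map_append, List.sum_append, List.map_map]
    congr 1
    have h1 := ih (fun a => f (x :: a))
    simp only [Function.comp_def]
    rw [h1]
    refine Finset.sum_congr rfl ?_
    intro m hm
    refine congrArg List.sum (List.map_congr_left ?_)
    intro a _
    rw [List.replicate_succ, List.cons_append]

-- the composition-generating recursion (coefficients of ((e^t - 1)/t)^K)
def pvPhi : Nat → Nat → ℚ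
  | 0, r => if r = 0 then 1 else 0
  | K + 1, r => ∑ m ∈ Finset.range (r + 1), (1 / ((m + 1).factorial : ℚ)) * pvPhi K (r - m)

-- counting multiplicities over a nodup pool turns the cwr-sum into pvPhi
theorem sum_pvCwr_eq_pvPhi : ∀ (pool : List Int), pool.Nodup → ∀ (r : Nat),
    ((pvCwr pool r).map
        (fun arr => (pool.map (fun x => 1 / (((1 + arr.count x).factorial : ℚ)))).prod)).sum
      = pvPhi pool.length r := by
  intro pool
  induction pool with
  | nil =>
    intro _ r
    cases r with
    | zero => simp [pvCwr, pvPhi]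
    | succ r => simp [pvCwr, pvPhi]
  | cons x xs ih =>
    intro hnd r
    have hx : x ∉ xs := (List.nodup_cons.mp hnd).1
    have hxs : xs.Nodup := (List.nodup_cons.mp hnd).2
    rw [sum_pvCwr_cons]
    show _ = pvPhi (xs.length + 1) r
    rw [pvPhi]
    refine Finset.sum_congr rfl ?_
    intro m hm
    have key : ((pvCwr xs (r - m)).map
        (fun a => ((x :: xs).map
          (fun y => 1 / (((1 + (List.replicate m x ++ a).count y).factorial : ℚ)))).prod)).sum
        = (1 / ((m + 1).factorial : ℚ)) *
          ((pvCwr xs (r - m)).map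
            (fun a => (xs.map (fun y => 1 / (((1 + a.count y).factorial : ℚ)))).prod)).sum := by
      rw [← List.sum_map_mul_left]
      refine congrArg List.sum (List.map_congr_left ?_)
      intro a ha
      have hsub := pvCwr_mem_subset xs (r - m) a ha
      have hax : a.count x = 0 := by
        rw [List.count_eq_zero]
        intro hmem; exact hx (hsub x hmem)
      simp only [List.map_cons, List.prod_cons]
      have hcx : (List.replicate m x ++ a).count x = m := by
        simp [List.count_append, hax, List.count_replicate]
      have hcy : ∀ y ∈ xs, (List.replicate m x ++ a).count y = a.count y := by
        intro y hy
        have hyx : y ≠ x := fun h => hx (h ▸ hy)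
        have hzero : List.count y (List.replicate m x) = 0 :=
          List.count_eq_zero.mpr (fun h => hyx (List.eq_of_mem_replicate h))
        rw [List.count_append, hzero, Nat.zero_add]
      rw [hcx]
      congr 1
      · rw [Nat.add_comm 1 m]
      · refine congrArg List.prod (List.map_congr_left ?_)
        intro y hy
        rw [hcy y hy]
    rw [key, ih hxs (r - m)]

-- the inclusion-exclusion surjection polynomial
def pvSur (K n : Nat) : ℤ :=
  ∑ j ∈ Finset.range (K + 1), (-1) ^ j * (K.choose j : ℤ) * ((K : ℤ) - (j : ℤ)) ^ n

-- Pascal step: pvSur (K+1) n = (same alternating sum against C(K,·) at argument shifted by one) - pvSur K n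
theorem pvSur_pascal (K n : Nat) :
    pvSur (K + 1) n =
      (∑ j ∈ Finset.range (K + 1), (-1) ^ j * (K.choose j : ℤ) * ((K : ℤ) + 1 - (j : ℤ)) ^ n)
        - pvSur K n := by
  unfold pvSur
  rw [Finset.sum_range_succ']
  have hC : ∀ i : ℕ, (((K + 1).choose (i + 1) : ℕ) : ℤ) = (K.choose i : ℤ) + (K.choose (i + 1) : ℤ) := by
    intro i; rw [Nat.choose_succ_succ]; push_cast; ring
  have step1 : ∑ i ∈ Finset.range (K + 1),
        (-1) ^ (i + 1) * (((K + 1).choose (i + 1) : ℕ) : ℤ) * ((K + 1 : ℕ) - ((i + 1 : ℕ) : ℤ)) ^ n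
      = (∑ i ∈ Finset.range (K + 1), -((-1) ^ i * (K.choose i : ℤ) * ((K : ℤ) - (i : ℤ)) ^ n))
        + ∑ i ∈ Finset.range (K + 1), (-1) ^ (i + 1) * (K.choose (i + 1) : ℤ) * ((K : ℤ) - (i : ℤ)) ^ n := by
    rw [← Finset.sum_add_distrib]
    refine Finset.sum_congr rfl ?_
    intro i hi
    rw [hC i]
    have : ((K + 1 : ℕ) : ℤ) - ((i + 1 : ℕ) : ℤ) = (K : ℤ) - (i : ℤ) := by push_cast; ring
    rw [this]
    ring
  rw [step1]
  have step2 : ∑ i ∈ Finset.range (K + 1), -((-1) ^ i * (K.choose i : ℤ) * ((K : ℤ) - (i : ℤ)) ^ n)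
      = -∑ j ∈ Finset.range (K + 1), (-1) ^ j * (K.choose j : ℤ) * ((K : ℤ) - (j : ℤ)) ^ n := by
    rw [Finset.sum_neg_distrib]
  have step3 : ∑ i ∈ Finset.range (K + 1), (-1) ^ (i + 1) * (K.choose (i + 1) : ℤ) * ((K : ℤ) - (i : ℤ)) ^ n
        + (-1) ^ 0 * (((K + 1).choose 0 : ℕ) : ℤ) * ((K + 1 : ℕ) - ((0 : ℕ) : ℤ)) ^ n
      = ∑ j ∈ Finset.range (K + 1), (-1) ^ j * (K.choose j : ℤ) * ((K : ℤ) + 1 - (j : ℤ)) ^ n := by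
    rw [Finset.sum_range_succ]
    have hz : (K.choose (K + 1) : ℤ) = 0 := by
      norm_cast
      exact Nat.choose_eq_zero_of_lt (by omega)
    rw [hz]
    rw [Finset.sum_range_succ' (fun j => (-1) ^ j * (K.choose j : ℤ) * ((K : ℤ) + 1 - (j : ℤ)) ^ n) K]
    have he : ∀ i ∈ Finset.range K,
        (-1) ^ (i + 1) * (K.choose (i + 1) : ℤ) * ((K : ℤ) + 1 - ((i + 1 : ℕ) : ℤ)) ^ n
        = (-1) ^ (i + 1) * (K.choose (i + 1) : ℤ) * ((K : ℤ) - (i : ℤ)) ^ n := by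
      intro i hi
      have : (K : ℤ) + 1 - ((i + 1 : ℕ) : ℤ) = (K : ℤ) - (i : ℤ) := by push_cast; ring
      rw [this]
    rw [Finset.sum_congr rfl he]
    simp only [Nat.choose_zero_right, Nat.choose_zero_right, pow_zero, Nat.cast_one, one_mul,
      Nat.cast_zero, sub_zero, Nat.cast_add]
    push_cast
    ring
  rw [← step3, step2]
  ring
-- convolution form: pvSur (K+1) n = Σ_{m<n} C(n, m+1) * pvSur K (n - (m+1))
theorem pvSur_succ (K n : Nat) :
    pvSur (K + 1) n =
      ∑ m ∈ Finset.range n, ((n.choose (m + 1) : ℤ)) * pvSur K (n - (m + 1)) := by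
  rw [pvSur_pascal]
  have hbin : ∀ j : ℕ, ((K : ℤ) + 1 - (j : ℤ)) ^ n
      = ∑ m ∈ Finset.range (n + 1), ((K : ℤ) - (j : ℤ)) ^ m * (n.choose m : ℤ) := by
    intro j
    have h := add_pow ((K : ℤ) - (j : ℤ)) 1 n
    simp only [one_pow, mul_one] at h
    rw [show (K : ℤ) + 1 - (j : ℤ) = ((K : ℤ) - (j : ℤ)) + 1 by ring, h]
  have hshift : ∑ j ∈ Finset.range (K + 1), (-1) ^ j * (K.choose j : ℤ) * ((K : ℤ) + 1 - (j : ℤ)) ^ n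
      = ∑ m ∈ Finset.range (n + 1), (n.choose m : ℤ) * pvSur K m := by
    calc ∑ j ∈ Finset.range (K + 1), (-1) ^ j * (K.choose j : ℤ) * ((K : ℤ) + 1 - (j : ℤ)) ^ n
        = ∑ j ∈ Finset.range (K + 1), ∑ m ∈ Finset.range (n + 1),
            (n.choose m : ℤ) * ((-1) ^ j * (K.choose j : ℤ) * ((K : ℤ) - (j : ℤ)) ^ m) := by
          refine Finset.sum_congr rfl ?_
          intro j hj
          rw [hbin j, Finset.mul_sum]
          refine Finset.sum_congr rfl ?_
          intro m hm
          ring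
      _ = ∑ m ∈ Finset.range (n + 1), ∑ j ∈ Finset.range (K + 1),
            (n.choose m : ℤ) * ((-1) ^ j * (K.choose j : ℤ) * ((K : ℤ) - (j : ℤ)) ^ m) := by
          exact Finset.sum_comm
      _ = ∑ m ∈ Finset.range (n + 1), (n.choose m : ℤ) * pvSur K m := by
          refine Finset.sum_congr rfl ?_
          intro m hm
          rw [pvSur, Finset.mul_sum]
  rw [hshift, Finset.sum_range_succ]
  simp only [Nat.choose_self, Nat.cast_one, one_mul]
  have hrefl : ∑ m ∈ Finset.range n, (n.choose m : ℤ) * pvSur K m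
      = ∑ m ∈ Finset.range n, (n.choose (m + 1) : ℤ) * pvSur K (n - (m + 1)) := by
    rw [← Finset.sum_range_reflect (fun m => ((n.choose m : ℤ)) * pvSur K m) n]
    refine Finset.sum_congr rfl ?_
    intro m hm
    have hmn : m < n := Finset.mem_range.mp hm
    have h1 : n - 1 - m = n - (m + 1) := by omega
    have h2 : n.choose (n - (m + 1)) = n.choose (m + 1) := by
      rw [← Nat.choose_symm (by omega : m + 1 ≤ n)]
    rw [h1, ← h2]
  rw [hrefl]
  ring

-- the alternating sum vanishes below the diagonal
theorem pvSur_vanish : ∀ (K n : Nat), n < K → pvSur K n = 0 := by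
  intro K
  induction K with
  | zero => intro n h; omega
  | succ K ih =>
    intro n h
    rw [pvSur_succ]
    refine Finset.sum_eq_zero ?_
    intro m hm
    have hmn : m < n := Finset.mem_range.mp hm
    rw [ih (n - (m + 1)) (by omega)]
    ring

-- (r+K)! · pvPhi K r is the surjection count pvSur K (r+K)
theorem pvPhi_eq_pvSur : ∀ (K r : Nat),
    (((r + K).factorial : ℚ)) * pvPhi K r = ((pvSur K (r + K) : ℤ) : ℚ) := by
  intro K
  induction K with
  | zero =>
    intro r
    cases r with
    | zero => simp [pvPhi, pvSur]
    | succ r => simp [pvPhi, pvSur]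
  | succ K ih =>
    intro r
    have hn : r + (K + 1) = (r + K) + 1 := by omega
    rw [pvPhi, Finset.mul_sum]
    have hterm : ∀ m ∈ Finset.range (r + 1),
        ((r + (K + 1)).factorial : ℚ) * ((1 / ((m + 1).factorial : ℚ)) * pvPhi K (r - m))
        = (((r + (K + 1)).choose (m + 1) : ℕ) : ℚ) * ((pvSur K ((r - m) + K) : ℤ) : ℚ) := by
      intro m hm
      have hmr : m ≤ r := by have := Finset.mem_range.mp hm; omega
      have hih := ih (r - m)
      have hle : m + 1 ≤ r + (K + 1) := by omega
      have hsub : r + (K + 1) - (m + 1) = (r - m) + K := by omega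
      rw [Nat.cast_choose ℚ hle, hsub]
      have hf1 : (((m + 1).factorial : ℚ)) ≠ 0 := by
        exact_mod_cast Nat.factorial_ne_zero (m + 1)
      have hf2 : ((((r - m) + K).factorial : ℚ)) ≠ 0 := by
        exact_mod_cast Nat.factorial_ne_zero ((r - m) + K)
      rw [← hih]
      field_simp
    rw [Finset.sum_congr rfl hterm]
    have hsucc := pvSur_succ K (r + (K + 1))
    have htrunc : ∑ m ∈ Finset.range (r + (K + 1)), ((r + (K + 1)).choose (m + 1) : ℤ) * pvSur K (r + (K + 1) - (m + 1))
        = ∑ m ∈ Finset.range (r + 1), ((r + (K + 1)).choose (m + 1) : ℤ) * pvSur K (r + (K + 1) - (m + 1)) := by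
      refine (Finset.sum_subset ?_ ?_).symm
      · intro m hm
        simp only [Finset.mem_range] at *
        omega
      · intro m hm1 hm2
        simp only [Finset.mem_range] at hm1 hm2
        rw [pvSur_vanish K (r + (K + 1) - (m + 1)) (by omega)]
        ring
    rw [hsucc, htrunc]
    push_cast
    refine Finset.sum_congr rfl ?_
    intro m hm
    have hmr : m ≤ r := by have := Finset.mem_range.mp hm; omega
    have hsub : r + (K + 1) - (m + 1) = (r - m) + K := by omega
    rw [hsub]

-- exact iterated division in ℕ
theorem foldl_div_exact : ∀ (l : List ℕ) (M : ℕ), l.prod ∣ M →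
    l.foldl (· / ·) M = M / l.prod := by
  intro l
  induction l with
  | nil => intro M h; simp
  | cons a t ih =>
    intro M h
    have hprod : a * t.prod ∣ M := by simpa [List.prod_cons] using h
    have ht : t.prod ∣ M / a := by
      rcases hprod with ⟨c, hc⟩
      rcases Nat.eq_zero_or_pos a with rfl | ha0
      · simp at hc
        simp [hc]
      · refine ⟨c, ?_⟩
        rw [hc, mul_assoc, Nat.mul_div_cancel_left _ ha0]
    rw [List.foldl_cons, ih (M / a) ht, List.prod_cons, Nat.div_div_eq_div_mul]

-- ∏ aᵢ! divides (Σ aᵢ)!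
theorem prod_factorial_dvd (l : List ℕ) : (l.map Nat.factorial).prod ∣ l.sum.factorial := by
  induction l with
  | nil => simp
  | cons a t ih =>
    simp only [List.map_cons, List.prod_cons, List.sum_cons]
    calc a.factorial * (t.map Nat.factorial).prod ∣ a.factorial * t.sum.factorial :=
          mul_dvd_mul_left _ ih
      _ ∣ (a + t.sum).factorial := Nat.factorial_mul_factorial_dvd_factorial_add _ _

-- pointwise-sum splitting for list sums over a common index list
theorem list_sum_map_add (l : List Int) (f g : Int → ℕ) :
    (l.map (fun i => f i + g i)).sum = (l.map f).sum + (l.map g).sum := by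
  induction l with
  | nil => simp
  | cons a t ih => simp [ih]; omega

-- over a nodup list containing a, the indicator of a sums to 1
theorem sum_indicator_one : ∀ (l : List Int) (a : Int), l.Nodup → a ∈ l →
    (l.map (fun i => if i = a then 1 else 0)).sum = 1 := by
  intro l
  induction l with
  | nil => intro a _ ha; simp at ha
  | cons b t ih =>
    intro a hnd ha
    have hb : b ∉ t := (List.nodup_cons.mp hnd).1
    have ht : t.Nodup := (List.nodup_cons.mp hnd).2
    rcases List.mem_cons.mp ha with rfl | hat
    · have hz : (t.map (fun i => if i = a then 1 else 0)).sum = 0 := by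
        refine List.sum_eq_zero ?_
        intro x hx
        rcases List.mem_map.mp hx with ⟨i, hi, rfl⟩
        have : i ≠ a := fun h => hb (h ▸ hi)
        simp [this]
      simp [hz]
    · have hba : b ≠ a := fun h => hb (h ▸ hat)
      simp [hba, ih a ht hat]

-- Σ over a nodup pool of the multiplicities is the length
theorem sum_count_eq_length : ∀ (arr pool : List Int), (∀ x ∈ arr, x ∈ pool) → pool.Nodup →
    (pool.map (fun i => arr.count i)).sum = arr.length := by
  intro arr
  induction arr with
  | nil => intro pool _ _; simp
  | cons a t ih =>
    intro pool hsub hnd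
    have h1 : (pool.map (fun i => t.count i)).sum = t.length :=
      ih pool (fun x hx => hsub x (List.mem_cons_of_mem _ hx)) hnd
    have h2 : ∀ i ∈ pool, (a :: t).count i = t.count i + (if i = a then 1 else 0) := by
      intro i _
      rcases eq_or_ne i a with rfl | h
      · simp [List.count_cons]
      · have h' : ¬a = i := fun hh => h hh.symm
        simp [List.count_cons, h, h']
    calc (pool.map (fun i => (a :: t).count i)).sum
        = (pool.map (fun i => t.count i + (if i = a then 1 else 0))).sum :=
          congrArg List.sum (List.map_congr_left h2)
      _ = (pool.map (fun i => t.count i)).sum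
            + (pool.map (fun i => if i = a then 1 else 0)).sum :=
          list_sum_map_add pool _ _
      _ = t.length + 1 := by
          rw [h1, sum_indicator_one pool a hnd (hsub a List.mem_cons_self)]
      _ = (a :: t).length := by simp
-- a foldl of Python floor-divisions by nat casts is a foldl of nat divisions
theorem foldl_floordiv_natCast : ∀ (l : List Int) (g : Int → ℕ) (M : ℕ),
    l.foldl (fun loc i => PySem.Int.floordiv loc ((g i : ℕ) : Int)) ((M : ℕ) : Int)
      = (((l.map g).foldl (· / ·) M : ℕ) : Int) := by
  intro l
  induction l with
  | nil => intro g M; simp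
  | cons a t ih =>
    intro g M
    rw [List.foldl_cons, PySem.Int.floordiv_natCast, ih g (M / g a), List.map_cons, List.foldl_cons]

-- product of reciprocals is the reciprocal of the product
theorem prod_one_div (l : List Int) (f : Int → ℕ) :
    (l.map (fun x => (1 : ℚ) / (f x : ℚ))).prod = 1 / (((l.map f).prod : ℕ) : ℚ) := by
  induction l with
  | nil => simp
  | cons a t ih =>
    simp only [List.map_cons, List.prod_cons, ih]
    push_cast
    rw [div_mul_div_comm, one_mul]

-- List.range sum to Finset.range sum
theorem list_range_map_sum (m : Nat) (f : Nat → ℤ) :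
    ((List.range m).map f).sum = ∑ j ∈ Finset.range m, f j := by
  induction m with
  | zero => simp
  | succ m ih => rw [List.range_succ, Finset.sum_range_succ, List.map_append, List.sum_append, ih]; simp

-- port B evaluates to pvSur
theorem portB_eq_pvSur (n k : Int) (hk : 0 ≤ k) (hn : 0 ≤ n) :
    combination_of_splits_py_alt n k = pvSur k.toNat n.toNat := by
  unfold combination_of_splits_py_alt
  rw [PySem.List.foldl_add]
  rw [PySem.List.pyRange_one]
  have hlen : (k + 1 - 0).toNat = k.toNat + 1 := by omega
  rw [hlen, List.map_map]
  have hmap : ∀ j ∈ List.range (k.toNat + 1),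
      ((fun j => (-1) ^ j.toNat * (Nat.choose k.toNat j.toNat : Int) * (k - j) ^ n.toNat) ∘ fun j : ℕ => (0 : ℤ) + (j : ℤ)) j
      = (-1) ^ j * (Nat.choose k.toNat j : Int) * ((k.toNat : ℤ) - (j : ℤ)) ^ n.toNat := by
    intro j hj
    simp only [Function.comp]
    have h2 : (0 : ℤ) + (j : ℤ) = (j : ℤ) := by ring
    have h3 : (k.toNat : ℤ) = k := by omega
    rw [h2, Int.toNat_natCast, h3]
  rw [List.map_congr_left hmap, list_range_map_sum, pvSur, zero_add]

-- a constant-one map sums to the length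
theorem sum_map_one (l : List Int) : (l.map (fun _ => (1 : Nat))).sum = l.length := by
  induction l with
  | nil => rfl
  | cons a t ih =>
    simp [ih]
    omega

-- the divide-and-conquer product is the product of the integer range
theorem pvProdRange_eq : ∀ (a b : Nat), pvProdRange a b = (List.range' a (b - a)).prod := by
  intro a b
  induction a, b using pvProdRange.induct with
  | case1 a b h hba =>
    rw [pvProdRange, if_pos h, if_pos hba, show b - a = 0 by omega]
    rfl
  | case2 a b h hba =>
    rw [pvProdRange, if_pos h, if_neg hba, show b - a = 1 by omega, List.range'_one]
    simp
  | case3 a b h ih1 ih2 =>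
    rw [pvProdRange, if_neg h, ih1, ih2, ← List.prod_append]
    congr 1
    have hh := @List.range'_append a ((a + b) / 2 - a) (b - (a + b) / 2) 1
    rw [show a + 1 * ((a + b) / 2 - a) = (a + b) / 2 by omega] at hh
    rw [show (a + b) / 2 - a + (b - (a + b) / 2) = b - a by omega] at hh
    exact hh

-- the factorial as a range product
theorem fact_eq_prod_range1 : ∀ (n : Nat), (List.range' 1 n).prod = n.factorial := by
  intro n
  induction n with
  | zero => rfl
  | succ t ih =>
    rw [List.range'_concat, List.prod_append, ih]
    simp [Nat.factorial_succ]
    ring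

-- pyFactI computes the factorial
theorem pyFactI_eq (m : Int) : pyFactI m = (m.toNat.factorial : Int) := by
  unfold pyFactI
  congr 1
  rw [pvProdRange_eq, show m.toNat + 1 - 1 = m.toNat by omega, fact_eq_prod_range1]

-- the product of the factorials of the 1 + multiplicities divides N!
theorem pvP_dvd (pool arr : List Int) (N : Nat)
    (hpool : pool.Nodup) (hsub : ∀ x ∈ arr, x ∈ pool)
    (hlen : N = arr.length + pool.length) :
    (pool.map (fun i => (1 + arr.count i).factorial)).prod ∣ N.factorial := by
  have hsum : (pool.map (fun i => 1 + arr.count i)).sum = N := by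
    rw [list_sum_map_add pool (fun _ => 1) (fun i => arr.count i),
        sum_count_eq_length arr pool hsub hpool, sum_map_one]
    omega
  have h := prod_factorial_dvd (pool.map (fun i => 1 + arr.count i))
  rw [hsum, List.map_map] at h
  simpa [Function.comp_def] using h

-- the A-side inner loop value, in exact form: N! / Pi (1 + count_i)!
theorem inner_loop_value (pool arr : List Int) (n : Int)
    (hpool : pool.Nodup) (hsub : ∀ x ∈ arr, x ∈ pool)
    (hN : n.toNat = arr.length + pool.length) :
    pool.foldl
        (fun loc i => PySem.Int.floordiv loc (pyFactI (1 + ((arr.filter (fun x => x == i)).length : Int))))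
        (pyFactI n)
      = ((n.toNat.factorial / ((pool.map (fun i => (1 + arr.count i).factorial)).prod) : Nat) : Int) := by
  have hfun : (fun (loc : Int) (i : Int) => PySem.Int.floordiv loc (pyFactI (1 + ((arr.filter (fun x => x == i)).length : Int))))
      = fun loc i => PySem.Int.floordiv loc ((((fun i => (1 + arr.count i).factorial) i : Nat) : Int)) := by
    funext loc i
    rw [pyFactI_eq]
    have hcount : (arr.filter (fun x => x == i)).length = arr.count i :=
      List.countP_eq_length_filter.symm
    have htn : (1 + ((arr.filter (fun x => x == i)).length : Int)).toNat = 1 + arr.count i := by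
      rw [hcount]; omega
    rw [htn]
  rw [hfun, pyFactI_eq]
  rw [foldl_floordiv_natCast pool (fun i => (1 + arr.count i).factorial) n.toNat.factorial]
  congr 1
  exact foldl_div_exact _ _ (pvP_dvd pool arr n.toNat hpool hsub hN)

-- ===== VERDICT (by name: the statement is the Claim_ definition above) =====
theorem combination_of_splits_py_spec : Claim_equal_combination_of_splits_py := by
  intro n k _ hpre
  obtain ⟨hkn, hn0⟩ := hpre
  unfold Spec_combination_of_splits_py
  by_cases hk : 0 ≤ k
  case neg =>
    -- k < 0: the pool range(k) is empty and n - k > 0, so A sums over nothing;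
    -- B's range(k+1) is empty.
    have hklt : k < n := by rcases hn0 with h | h; omega; exact h
    simp only [combination_of_splits_py]
    unfold combination_of_splits_py_alt
    rw [if_neg (by omega)]
    rw [PySem.List.pyRange_one_eq_nil (by omega : k ≤ 0)]
    rw [PySem.List.pyRange_one_eq_nil (by omega : k + 1 ≤ 0)]
    obtain ⟨r', hr⟩ : ∃ r', (n - k).toNat = r' + 1 := ⟨(n - k).toNat - 1, by omega⟩
    rw [hr]
    simp [pvCwr]
  case pos =>
    have hn : 0 ≤ n := by omega
    have hpoolnd : (PySem.List.pyRange 0 k 1).Nodup := PySem.List.nodup_pyRange_one 0 k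
    have hpoollen : (PySem.List.pyRange 0 k 1).length = k.toNat := by
      rw [PySem.List.length_pyRange_one]; omega
    simp only [combination_of_splits_py]
    rw [if_neg (by omega)]
    rw [PySem.List.foldl_add, zero_add]
    have hmap : ∀ arr ∈ pvCwr (PySem.List.pyRange 0 k 1) (n - k).toNat,
        (PySem.List.pyRange 0 k 1).foldl
            (fun loc i => PySem.Int.floordiv loc (pyFactI (1 + ((arr.filter (fun x => x == i)).length : Int))))
            (pyFactI n)
          = ((n.toNat.factorial / (((PySem.List.pyRange 0 k 1).map (fun i => (1 + arr.count i).factorial)).prod) : Nat) : Int) := by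
      intro arr harr
      refine inner_loop_value _ arr n hpoolnd (pvCwr_mem_subset _ _ arr harr) ?_
      rw [pvCwr_mem_length _ _ arr harr, hpoollen]
      omega
    rw [List.map_congr_left hmap, portB_eq_pvSur n k hk hn]
    -- both sides are now explicit; pass through Rat to use the factorial identities
    have hq : ((((pvCwr (PySem.List.pyRange 0 k 1) (n - k).toNat).map
          (fun arr => ((n.toNat.factorial / (((PySem.List.pyRange 0 k 1).map (fun i => (1 + arr.count i).factorial)).prod) : Nat) : Int))).sum : Int) : Rat)
        = ((pvSur k.toNat n.toNat : Int) : Rat) := by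
      rw [Int.cast_list_sum, List.map_map]
      have hmap2 : ∀ arr ∈ pvCwr (PySem.List.pyRange 0 k 1) (n - k).toNat,
          ((Int.cast ∘ fun arr => ((n.toNat.factorial / (((PySem.List.pyRange 0 k 1).map (fun i => (1 + arr.count i).factorial)).prod) : Nat) : Int)) arr : Rat)
          = (n.toNat.factorial : Rat) *
              ((PySem.List.pyRange 0 k 1).map (fun x => 1 / (((1 + arr.count x).factorial : Rat)))).prod := by
        intro arr harr
        have hdvd : ((PySem.List.pyRange 0 k 1).map (fun i => (1 + arr.count i).factorial)).prod ∣ n.toNat.factorial := by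
          refine pvP_dvd _ arr n.toNat hpoolnd (pvCwr_mem_subset _ _ arr harr) ?_
          rw [pvCwr_mem_length _ _ arr harr, hpoollen]
          omega
        have hPpos : 0 < ((PySem.List.pyRange 0 k 1).map (fun i => (1 + arr.count i).factorial)).prod := by
          refine List.prod_pos ?_
          intro x hx
          rcases List.mem_map.mp hx with ⟨i, _, rfl⟩
          exact Nat.factorial_pos _
        have hPne : ((((PySem.List.pyRange 0 k 1).map (fun i => (1 + arr.count i).factorial)).prod : Nat) : Rat) ≠ 0 := by
          exact_mod_cast Nat.pos_iff_ne_zero.mp hPpos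
        simp only [Function.comp_apply, Int.cast_natCast]
        rw [Nat.cast_div hdvd hPne,
            prod_one_div (PySem.List.pyRange 0 k 1) (fun i => (1 + arr.count i).factorial),
            div_eq_mul_one_div]
      rw [List.map_congr_left hmap2, List.sum_map_mul_left,
          sum_pvCwr_eq_pvPhi (PySem.List.pyRange 0 k 1) hpoolnd ((n - k).toNat), hpoollen]
      have hid := pvPhi_eq_pvSur k.toNat ((n - k).toNat)
      have hNrK : (n - k).toNat + k.toNat = n.toNat := by omega
      rw [hNrK] at hid
      exact hid
    exact_mod_cast hq
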